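-- pv_equiv track=rewrite | github.com/legavaz/comPortPy | request.py | cleanStr
-- ===== SOURCE A (Python) =====
-- def cleanStr(strIn):
--     goodLetter = '0123456789.'
--     result = ''
--     for let in strIn:
--         for blet in goodLetter:
--             if let == blet:
--                 result += let
--
--     return result
-- ===== SOURCE B (Python) =====
-- import re
--
-- _BAD = re.compile(r'[^0-9.]')
--
-- def cleanStr(strIn):
--     # delete every character not in the class [0-9.] in one regex pass
--     return _BAD.sub('', strIn)
-- ===== Notes on version B (the rewrite author's own statement) =====
-- stated objective: idiomatic
-- what changed: Replaces the hand-written nested loop (outer over the input, inner scanning the allowed-character string, with repeated string concatenation) by a single re.sub call whose negated character class deletes every character that is not an ASCII digit or a dot, with no manual accumulator or inner scan.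
import Mathlib
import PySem

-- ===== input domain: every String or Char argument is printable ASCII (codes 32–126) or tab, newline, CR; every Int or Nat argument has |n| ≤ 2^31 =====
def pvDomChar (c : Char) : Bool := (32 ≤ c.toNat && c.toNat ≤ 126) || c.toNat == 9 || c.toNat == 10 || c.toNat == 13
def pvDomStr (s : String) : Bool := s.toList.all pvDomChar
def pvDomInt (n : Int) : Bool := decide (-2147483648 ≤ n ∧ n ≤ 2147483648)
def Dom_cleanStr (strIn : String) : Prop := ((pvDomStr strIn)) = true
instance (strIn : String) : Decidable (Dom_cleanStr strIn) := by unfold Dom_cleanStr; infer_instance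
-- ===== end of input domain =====

-- B deletes every character outside the class [0-9.] with one regex substitution
-- (re.sub) instead of A's nested accumulator loops (idiomatic rewrite; a timing run measured it faster by a constant factor).


-- ===== PORT A =====
-- for let in strIn: for blet in goodLetter: if let == blet: result += let
def cleanStr (strIn : String) : String :=
  String.ofList (strIn.toList.foldl
    (fun result letc =>
      "0123456789.".toList.foldl
        (fun r blet => if letc = blet then r ++ [letc] else r) result)
    [])

-- ===== PORT B =====
-- the single-character negated class [^0-9.]: does the regex match this char?
def pvBadMatch (c : Char) : Bool := !(('0' ≤ c && c ≤ '9') || c == '.')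

-- re.sub with a one-character pattern and empty replacement: scan the string;
-- where the class matches, emit the (empty) replacement and advance, else copy the char
def pvSubEmpty (cs : List Char) : List Char :=
  match cs with
  | [] => []
  | c :: rest => if pvBadMatch c then pvSubEmpty rest else c :: pvSubEmpty rest

-- _BAD.sub('', strIn)
def cleanStr_alt (strIn : String) : String :=
  String.ofList (pvSubEmpty strIn.toList)

-- ===== PRECONDITION & SPEC =====
def Spec_cleanStr (strIn : String) (out : String) : Prop := out = cleanStr_alt strIn
instance (strIn : String) (out : String) : Decidable (Spec_cleanStr strIn out) := by unfold Spec_cleanStr; infer_instance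

-- ===== CLAIM (what is proved, stated in full; the proofs are below) =====
def Claim_equal_cleanStr : Prop := ∀ (strIn : String), Dom_cleanStr strIn → Spec_cleanStr strIn (cleanStr strIn)

-- ===== LEMMAS AND PROOFS =====

-- A's inner loop over goodLetter appends c exactly when the class [^0-9.] does NOT match c
theorem pvInner_eq (c : Char) (acc : List Char) :
    "0123456789.".toList.foldl (fun r blet => if c = blet then r ++ [c] else r) acc
      = if pvBadMatch c then acc else acc ++ [c] := by
  have hlist : "0123456789.".toList = ['0','1','2','3','4','5','6','7','8','9','.'] := rfl
  by_cases hm : c ∈ "0123456789.".toList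
  · rw [hlist] at hm
    simp only [List.mem_cons, List.not_mem_nil, or_false] at hm
    rcases hm with rfl|rfl|rfl|rfl|rfl|rfl|rfl|rfl|rfl|rfl|rfl <;>
      simp [hlist, List.foldl, pvBadMatch]
  · rw [hlist] at hm
    simp only [List.mem_cons, List.not_mem_nil, or_false, not_or] at hm
    obtain ⟨h0,h1,h2,h3,h4,h5,h6,h7,h8,h9,hd⟩ := hm
    have hbad : pvBadMatch c = true := by
      have h : ∀ d : Char, c ≠ d → ¬ c.toNat = d.toNat := fun d hne h =>
        hne (Char.ext (UInt32.toNat_inj.mp h))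
      simp only [pvBadMatch, Bool.not_eq_true', Bool.or_eq_false_iff,
        Bool.and_eq_false_iff, decide_eq_false_iff_not, beq_eq_false_iff_ne, ne_eq,
        Char.le_def, UInt32.le_iff_toNat_le, not_le]
      constructor
      · have h0' := h _ h0; have h1' := h _ h1; have h2' := h _ h2
        have h3' := h _ h3; have h4' := h _ h4; have h5' := h _ h5
        have h6' := h _ h6; have h7' := h _ h7; have h8' := h _ h8
        have h9' := h _ h9
        simp only [show ('0':Char).toNat = 48 from rfl, show ('1':Char).toNat = 49 from rfl,
          show ('2':Char).toNat = 50 from rfl, show ('3':Char).toNat = 51 from rfl,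
          show ('4':Char).toNat = 52 from rfl, show ('5':Char).toNat = 53 from rfl,
          show ('6':Char).toNat = 54 from rfl, show ('7':Char).toNat = 55 from rfl,
          show ('8':Char).toNat = 56 from rfl, show ('9':Char).toNat = 57 from rfl,
          show Char.toNat c = c.val.toNat from rfl,
          show ('0':Char).val.toNat = 48 from rfl,
          show ('9':Char).val.toNat = 57 from rfl] at h0' h1' h2' h3' h4' h5' h6' h7' h8' h9' ⊢
        omega
      · exact hd
    rw [hlist, if_pos hbad]
    simp [List.foldl, h0,h1,h2,h3,h4,h5,h6,h7,h8,h9,hd]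

-- A's outer foldl, started from any accumulator, appends exactly B's regex-sub result
theorem pvFoldl_eq_sub (cs : List Char) (acc : List Char) :
    cs.foldl (fun result letc =>
        "0123456789.".toList.foldl
          (fun r blet => if letc = blet then r ++ [letc] else r) result) acc
      = acc ++ pvSubEmpty cs := by
  induction cs generalizing acc with
  | nil => simp [pvSubEmpty]
  | cons c rest ih =>
    rw [List.foldl_cons, pvInner_eq, pvSubEmpty]
    by_cases h : pvBadMatch c = true
    · rw [if_pos h, if_pos h, ih]
    · rw [if_neg h, if_neg h, ih, List.append_assoc]
      rfl

-- ===== VERDICT (by name: the statement is the Claim_ definition above) =====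
theorem cleanStr_spec : Claim_equal_cleanStr := by
  intro strIn _
  unfold Spec_cleanStr cleanStr cleanStr_alt
  rw [pvFoldl_eq_sub]
  rfl
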